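-- pv_equiv track=rewrite | github.com/mikkomaa/advent-of-code-2021 | src/day15_2.py | extend
-- ===== SOURCE A (Python) =====
-- def extend(rows, times=5):
--     """Extend rows. Return the result."""
--     extended = rows
--     length = len(rows)
--     for row in extended:  # Lengthen rows.
--         for i in range((times - 1) * length):
--             row.append(row[i] % 9 + 1)
--     for i in range((times - 1) * length):  # Add rows.
--         extended.append([j % 9 + 1 for j in extended[i]])
--     return extended
-- ===== SOURCE B (Python) =====
-- def extend(rows, times=5):
--     """Extend rows. Return the result."""
--     n = len(rows)
--     extra = (times - 1) * n
--     if extra > 0: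
--         for row in rows:
--             w = len(row)
--             orig = row[:]
--             row.extend((orig[p % w] % 9 + p // w - 1) % 9 + 1
--                        for p in range(w, w + extra))
--         base = [row[:] for row in rows]
--         for q in range(n, n + extra):
--             k = q // n
--             rows.append([(v % 9 + k - 1) % 9 + 1 for v in base[q % n]])
--     return rows
-- ===== Notes on version B (the rewrite author's own statement) =====
-- stated objective: alternative
-- what changed: A grows the grid by reading back previously appended cells (a self-referential recurrence row[i] % 9 + 1); B snapshots the original dimensions and computes every new cell directly from the original data with the closed form ((orig[p % w] % 9 + p // w - 1) % 9) + 1, and derives each appended row from a snapshot by one arithmetic map.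
-- outside the precondition, e.g. on extend([[]], 2): A raises IndexError, B raises ZeroDivisionError; on extend([[1], []], 3): A raises IndexError, B raises ZeroDivisionError
import Mathlib
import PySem

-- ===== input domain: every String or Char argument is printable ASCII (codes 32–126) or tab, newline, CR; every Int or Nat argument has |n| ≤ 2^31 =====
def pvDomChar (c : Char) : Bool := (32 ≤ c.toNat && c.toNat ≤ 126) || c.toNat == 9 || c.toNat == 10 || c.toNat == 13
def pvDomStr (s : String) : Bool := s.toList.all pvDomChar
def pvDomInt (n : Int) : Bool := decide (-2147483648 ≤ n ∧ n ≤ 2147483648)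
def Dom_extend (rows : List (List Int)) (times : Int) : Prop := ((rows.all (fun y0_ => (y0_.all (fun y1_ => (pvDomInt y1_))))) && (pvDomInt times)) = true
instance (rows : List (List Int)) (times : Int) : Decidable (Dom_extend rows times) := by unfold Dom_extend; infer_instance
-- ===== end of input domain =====

-- B replaces A's read-back recurrence by a per-cell closed form (same in-place mutation
-- contract; this file proves equality of the RETURN value, which is the mutated list itself).

-- ===== PORT A =====
-- row.append(row[i] % 9 + 1) / extended.append([...]): row[i] and extended[i] are always
-- in range under Pre_extend; '.getD' stands for the IndexError case that Pre_ excludes.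
def extend (rows : List (List Int)) (times : Int) : List (List Int) :=
  let length : Int := rows.length
  let grown := rows.map (fun row =>
    (PySem.List.pyRange 0 ((times - 1) * length) 1).foldl
      (fun r i => r ++ [PySem.Int.mod ((PySem.List.pyGet? r i).getD 0) 9 + 1]) row)
  (PySem.List.pyRange 0 ((times - 1) * length) 1).foldl
    (fun ext i => ext ++ [((PySem.List.pyGet? ext i).getD []).map (fun j => PySem.Int.mod j 9 + 1)]) grown

-- ===== PORT B =====
def extend_alt (rows : List (List Int)) (times : Int) : List (List Int) :=
  let n : Int := rows.length
  let extra : Int := (times - 1) * n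
  if 0 < extra then
    let grown := rows.map (fun row =>
      let w : Int := row.length
      row ++ (PySem.List.pyRange w (w + extra) 1).map (fun p =>
        PySem.Int.mod (PySem.Int.mod ((PySem.List.pyGet? row (PySem.Int.mod p w)).getD 0) 9
          + PySem.Int.floordiv p w - 1) 9 + 1))
    grown ++ (PySem.List.pyRange n (n + extra) 1).map (fun q =>
      ((PySem.List.pyGet? grown (PySem.Int.mod q n)).getD []).map (fun v =>
        PySem.Int.mod (PySem.Int.mod v 9 + PySem.Int.floordiv q n - 1) 9 + 1))
  else rows

-- ===== PRECONDITION & SPEC =====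
-- Pre_ excludes grids containing an empty row when cells must be appended
-- ((times-1)*len(rows) > 0): there A raises IndexError (row[0] on an empty row)
-- and B raises ZeroDivisionError (p % 0).
def Pre_extend (rows : List (List Int)) (times : Int) : Prop :=
  0 < (times - 1) * (rows.length : Int) → ∀ row ∈ rows, row ≠ []
instance (rows : List (List Int)) (times : Int) : Decidable (Pre_extend rows times) := by unfold Pre_extend; infer_instance
def pvWitness_extend : List (List Int) × Int := ([[1, 8], [9, 2]], 5)
def Spec_extend (rows : List (List Int)) (times : Int) (out : List (List Int)) : Prop := out = extend_alt rows times
instance (rows : List (List Int)) (times : Int) (out : List (List Int)) : Decidable (Spec_extend rows times out) := by unfold Spec_extend; infer_instance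

-- ===== CLAIM (what is proved, stated in full; the proofs are below) =====
def Claim_equal_extend : Prop := ∀ (rows : List (List Int)) (times : Int), Dom_extend rows times → Pre_extend rows times → Spec_extend rows times (extend rows times)

-- ===== LEMMAS AND PROOFS =====

-- the wrapping increment x % 9 + 1
def pvInc (a : Int) : Int := a % 9 + 1

-- abstract shape of BOTH of A's loops: repeatedly append f(current[i])
def pvGrow {α : Type} (d : α) (f : α → α) (L : List α) : Nat → List α
  | 0 => L
  | m + 1 => pvGrow d f L m ++ [f ((pvGrow d f L m).getD m d)]

-- closed form for the cell at overall index p (period = L.length)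
def pvCF {α : Type} (d : α) (f : α → α) (L : List α) (p : Nat) : α :=
  f^[p / L.length] (L.getD (p % L.length) d)

lemma pvCF_step {α : Type} (d : α) (f : α → α) (L : List α) (hw : 0 < L.length) (p : Nat) :
    f (pvCF d f L p) = pvCF d f L (p + L.length) := by
  unfold pvCF
  rw [Nat.add_div_right _ hw, Nat.add_mod_right, Function.iterate_succ_apply']

lemma pvGrow_eq {α : Type} (d : α) (f : α → α) (L : List α) (hw : 0 < L.length) (m : Nat) :
    pvGrow d f L m = L ++ (List.range m).map (fun i => pvCF d f L (L.length + i)) := by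
  induction m with
  | zero => simp [pvGrow]
  | succ m ih =>
    have hget : (L ++ (List.range m).map (fun i => pvCF d f L (L.length + i))).getD m d
        = pvCF d f L m := by
      by_cases hm : m < L.length
      · rw [List.getD_append _ _ _ _ hm]
        unfold pvCF
        rw [Nat.div_eq_of_lt hm, Nat.mod_eq_of_lt hm, Function.iterate_zero_apply]
      · rw [Nat.not_lt] at hm
        rw [List.getD_append_right _ _ _ _ hm]
        have hlt : m - L.length < m := by omega
        have : ((List.range m).map (fun i => pvCF d f L (L.length + i))).getD (m - L.length) d
            = pvCF d f L (L.length + (m - L.length)) := by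
          rw [List.getD_eq_getElem _ _ (by simpa using hlt)]
          simp
        rw [this, Nat.add_sub_cancel' hm]
    rw [pvGrow, ih, hget, List.range_succ, List.map_append, List.map_singleton,
      ← List.append_assoc]
    congr 2
    rw [Nat.add_comm L.length m]
    exact pvCF_step d f L hw m

lemma pvFold_eq_grow {α : Type} (d : α) (f : α → α) (L : List α) (e : Nat) :
    (PySem.List.pyRange 0 (e : Int) 1).foldl
      (fun r i => r ++ [f ((PySem.List.pyGet? r i).getD d)]) L = pvGrow d f L e := by
  induction e with
  | zero => simp [pvGrow, PySem.List.pyRange_one_eq_nil]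
  | succ e ih =>
    have hcast : ((e + 1 : Nat) : Int) = (e : Int) + 1 := by push_cast; ring
    rw [hcast, PySem.List.pyRange_one_succ_right (by positivity), List.foldl_append, ih]
    simp only [List.foldl_cons, List.foldl_nil]
    rw [show pvGrow d f L (e + 1) = pvGrow d f L e ++ [f ((pvGrow d f L e).getD e d)] from rfl]
    simp only [PySem.List.pyGet?_natCast, List.getD_eq_getElem?_getD]

lemma pvInc_iter (a : Int) (j : Nat) (hj : 1 ≤ j) :
    pvInc^[j] a = (a % 9 + (j : Int) - 1) % 9 + 1 := by
  induction j with
  | zero => omega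
  | succ j ih =>
    rcases Nat.eq_zero_or_pos j with h0 | h1
    · subst h0
      rw [Function.iterate_succ_apply', Function.iterate_zero_apply]
      simp only [pvInc]
      omega
    · rw [Function.iterate_succ_apply', ih h1]
      simp only [pvInc]
      push_cast
      omega

lemma pvMap_iter (f : Int → Int) (j : Nat) (L : List Int) :
    (List.map f)^[j] L = L.map f^[j] := by
  induction j with
  | zero => simp
  | succ j ih =>
    rw [Function.iterate_succ_apply', ih, List.map_map]
    apply List.map_congr_left
    intro x _
    simp [Function.iterate_succ_apply']

-- B's horizontal arithmetic = the closed form pvCF over pvInc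
lemma pvRowB (L : List Int) (hL : L ≠ []) (E : Int) (hE : 0 ≤ E) :
    (PySem.List.pyRange (L.length : Int) ((L.length : Int) + E) 1).map (fun p =>
        PySem.Int.mod (PySem.Int.mod ((PySem.List.pyGet? L
            (PySem.Int.mod p (L.length : Int))).getD 0) 9
          + PySem.Int.floordiv p (L.length : Int) - 1) 9 + 1)
      = (List.range E.toNat).map (fun i => pvCF 0 pvInc L (L.length + i)) := by
  have hw : 0 < L.length := List.length_pos_iff.mpr hL
  rw [PySem.List.pyRange_one]
  have hEt : ((L.length : Int) + E - (L.length : Int)).toNat = E.toNat := by omega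
  rw [hEt, List.map_map]
  apply List.map_congr_left
  intro k _
  simp only [Function.comp_apply]
  have hcast : (L.length : Int) + (k : Int) = ((L.length + k : Nat) : Int) := by push_cast; ring
  rw [hcast, PySem.Int.mod_natCast, PySem.Int.floordiv_natCast, PySem.List.pyGet?_natCast]
  have hj : 1 ≤ (L.length + k) / L.length := Nat.one_le_div_iff hw |>.mpr (Nat.le_add_right _ _)
  unfold pvCF
  rw [pvInc_iter _ _ hj]
  simp [List.getD_eq_getElem?_getD]

-- B's vertical arithmetic = the closed form pvCF over List.map pvInc
lemma pvColB (G : List (List Int)) (hG : G ≠ []) (E : Int) (hE : 0 ≤ E) :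
    (PySem.List.pyRange (G.length : Int) ((G.length : Int) + E) 1).map (fun q =>
        ((PySem.List.pyGet? G (PySem.Int.mod q (G.length : Int))).getD []).map (fun v =>
          PySem.Int.mod (PySem.Int.mod v 9 + PySem.Int.floordiv q (G.length : Int) - 1) 9 + 1))
      = (List.range E.toNat).map (fun i => pvCF [] (List.map pvInc) G (G.length + i)) := by
  have hw : 0 < G.length := List.length_pos_iff.mpr hG
  rw [PySem.List.pyRange_one]
  have hEt : ((G.length : Int) + E - (G.length : Int)).toNat = E.toNat := by omega
  rw [hEt, List.map_map]
  apply List.map_congr_left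
  intro k _
  simp only [Function.comp_apply]
  have hcast : (G.length : Int) + (k : Int) = ((G.length + k : Nat) : Int) := by push_cast; ring
  rw [hcast, PySem.Int.mod_natCast, PySem.Int.floordiv_natCast, PySem.List.pyGet?_natCast]
  have hj : 1 ≤ (G.length + k) / G.length := Nat.one_le_div_iff hw |>.mpr (Nat.le_add_right _ _)
  unfold pvCF
  rw [pvMap_iter]
  have hfun : pvInc^[(G.length + k) / G.length]
      = fun v : Int => (v % 9 + (((G.length + k) / G.length : Nat) : Int) - 1) % 9 + 1 :=
    funext (fun v => pvInc_iter v _ hj)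
  rw [hfun]
  simp [List.getD_eq_getElem?_getD]

-- ===== VERDICT (by name: the statement is the Claim_ definition above) =====
theorem extend_spec : Claim_equal_extend := by
  intro rows times _ hpre
  unfold Spec_extend extend extend_alt
  simp only []
  by_cases hE : 0 < (times - 1) * (rows.length : Int)
  · rw [if_pos hE]
    have hrows : rows ≠ [] := by
      intro h
      subst h
      simp at hE
    set E := (times - 1) * (rows.length : Int) with hEdef
    have hEe : E = (E.toNat : Int) := (Int.toNat_of_nonneg hE.le).symm
    have hne := hpre hE
    -- horizontal: per-row equality of the two grown rows
    have hrow : ∀ row ∈ rows,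
        (PySem.List.pyRange 0 E 1).foldl
          (fun r i => r ++ [PySem.Int.mod ((PySem.List.pyGet? r i).getD 0) 9 + 1]) row
        = row ++ (PySem.List.pyRange (row.length : Int) ((row.length : Int) + E) 1).map (fun p =>
            PySem.Int.mod (PySem.Int.mod ((PySem.List.pyGet? row
                (PySem.Int.mod p (row.length : Int))).getD 0) 9
              + PySem.Int.floordiv p (row.length : Int) - 1) 9 + 1) := by
      intro row hmem
      have hwpos : 0 < row.length := List.length_pos_iff.mpr (hne row hmem)
      have hstep : (fun (r : List Int) (i : Int) =>
            r ++ [PySem.Int.mod ((PySem.List.pyGet? r i).getD 0) 9 + 1])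
          = fun r i => r ++ [pvInc ((PySem.List.pyGet? r i).getD 0)] := by
        funext r i
        simp [pvInc]
      rw [hstep]
      conv_lhs => rw [hEe]
      rw [pvFold_eq_grow 0 pvInc row E.toNat, pvGrow_eq 0 pvInc row hwpos E.toNat,
        pvRowB row (hne row hmem) E hE.le]
    rw [List.map_congr_left hrow]
    -- vertical
    set G := rows.map (fun row =>
      row ++ (PySem.List.pyRange (row.length : Int) ((row.length : Int) + E) 1).map (fun p =>
        PySem.Int.mod (PySem.Int.mod ((PySem.List.pyGet? row
            (PySem.Int.mod p (row.length : Int))).getD 0) 9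
          + PySem.Int.floordiv p (row.length : Int) - 1) 9 + 1)) with hGdef
    have hGlen : (G.length : Int) = (rows.length : Int) := by simp [hGdef]
    have hGne : G ≠ [] := by
      simp [hGdef, hrows]
    have hstep2 : (fun (ext : List (List Int)) (i : Int) =>
          ext ++ [((PySem.List.pyGet? ext i).getD []).map (fun j => PySem.Int.mod j 9 + 1)])
        = fun ext i => ext ++ [List.map pvInc ((PySem.List.pyGet? ext i).getD [])] := by
      funext ext i
      simp [pvInc]
    rw [hstep2]
    conv_lhs => rw [hEe]
    rw [pvFold_eq_grow ([] : List Int) (List.map pvInc) G E.toNat,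
      pvGrow_eq ([] : List Int) (List.map pvInc) G (List.length_pos_iff.mpr hGne) E.toNat,
      ← hGlen, pvColB G hGne E hE.le]
  · rw [if_neg hE]
    push Not at hE
    rw [PySem.List.pyRange_one_eq_nil hE]
    simp
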